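-- pv_equiv track=rewrite | github.com/momodigital/brainx | HKB/brainx.py | gen_3d_irisan_final
-- ===== SOURCE A (Python) =====
-- def gen_semua_3d_dari_top3(top3_digits):
--     """
--     TAHAP 2: Generate semua angka 000-999 yang mengandung setidaknya SATU digit dari top3
--     Contoh: top3 = [6,1,4] → generate semua angka yang mengandung 6 atau 1 atau 4
--     """
--     if not top3_digits:
--         return []
--
--     # Konversi ke string untuk pengecekan
--     top3_set = set(str(d) for d in top3_digits)
--     hasil = []
--
--     for i in range(1000):
--         angka = f"{i:03d}"
--         if any(d in top3_set for d in angka):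
--             hasil.append(angka)
--
--     return hasil
--
-- def gen_3d_irisan_final(irisan_2d, top3_digits):
--     """
--     TAHAP 3: Generate 3D IRISAN FINAL berdasarkan:
--     - irisan_2d: hasil irisan antara FILTER 2D dan KEPALA*EKOR (list 2D)
--     - top3_digits: 3 digit top (misal: [6,1,4])
--
--     Logika:
--     - Generate semua angka 000-999 yang mengandung setidaknya SATU digit dari top3 (TAHAP 2)
--     - Dari angka-angka tersebut, ambil yang 2 digit terakhirnya (2D belakang)
--       ada di dalam irisan_2d (TAHAP 1)
--     """
--     if not irisan_2d or not top3_digits: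
--         return []
--
--     # TAHAP 2: Generate semua 3D dari top3
--     semua_3d = gen_semua_3d_dari_top3(top3_digits)
--
--     # Konversi irisan_2d ke set untuk pengecekan cepat
--     irisan_set = set(irisan_2d)
--
--     # TAHAP 3: Filter berdasarkan 2D belakang
--     hasil = []
--     for angka in semua_3d:
--         dua_d_belakang = angka[1:3]  # Ambil 2 digit terakhir
--         if dua_d_belakang in irisan_set:
--             hasil.append(angka)
--
--     return hasil
-- ===== SOURCE B (Python) =====
-- def gen_3d_irisan_final(irisan_2d, top3_digits):
--     if not irisan_2d or not top3_digits:
--         return []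
--     irisan_set = set(irisan_2d)
--     valid_suffixes = [s for s in (f"{j:02d}" for j in range(100)) if s in irisan_set]
--     top3_set = set(str(d) for d in top3_digits)
--     hasil = []
--     for d in "0123456789":
--         for s in valid_suffixes:
--             angka = d + s
--             if any(c in top3_set for c in angka):
--                 hasil.append(angka)
--     return hasil
-- ===== Notes on version B (the rewrite author's own statement) =====
-- stated objective: alternative
-- what changed: Instead of enumerating all 1000 numbers 000-999 and filtering twice, B precomputes the valid two-digit suffixes (the 2D strings 00-99 present in irisan_2d) and builds candidates as hundreds-digit + suffix, testing only the top3-digit condition per candidate; order is preserved because the enumeration is hundreds-major, suffix-minor.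
import Mathlib
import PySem

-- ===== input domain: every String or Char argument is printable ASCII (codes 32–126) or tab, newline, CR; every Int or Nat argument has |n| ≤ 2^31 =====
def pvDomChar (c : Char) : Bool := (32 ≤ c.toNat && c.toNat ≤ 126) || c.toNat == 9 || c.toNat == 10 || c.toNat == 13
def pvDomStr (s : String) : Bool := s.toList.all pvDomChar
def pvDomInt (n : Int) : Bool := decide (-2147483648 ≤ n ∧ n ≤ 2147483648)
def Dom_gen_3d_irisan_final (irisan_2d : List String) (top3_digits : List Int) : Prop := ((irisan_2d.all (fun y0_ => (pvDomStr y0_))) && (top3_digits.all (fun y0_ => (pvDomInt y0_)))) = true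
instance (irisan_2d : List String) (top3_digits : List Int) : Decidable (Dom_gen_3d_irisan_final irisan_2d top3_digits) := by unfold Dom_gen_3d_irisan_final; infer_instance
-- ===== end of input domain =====

-- ===== PORT A =====
-- B replaces A's 000-999 enumeration by a suffix-first construction: it precomputes the
-- valid 2-digit suffixes from irisan_2d once and builds candidates per hundreds digit
-- (alternative decomposition; same results, no asymptotic claim).

-- hand port of f"{i:03d}": exact for 0 <= i < 1000, the only values A formats
def pad3 (i : Int) : List Char :=
  [Nat.digitChar (i.toNat / 100), Nat.digitChar (i.toNat / 10 % 10), Nat.digitChar (i.toNat % 10)]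

def gen_semua_3d_dari_top3 (top3_digits : List Int) : List String :=
  if top3_digits = [] then []
  else
    let top3_set : PySem.Set String := PySem.Set.ofList (top3_digits.map PySem.Int.toStr)
    (PySem.List.pyRange 0 1000 1).foldl (fun hasil i =>
      let angka := String.ofList (pad3 i)
      if angka.toList.any (fun c => PySem.Set.contains top3_set (String.ofList [c]))
      then hasil ++ [angka] else hasil) []

def gen_3d_irisan_final (irisan_2d : List String) (top3_digits : List Int) : List String :=
  if irisan_2d = [] ∨ top3_digits = [] then []
  else
    let semua_3d := gen_semua_3d_dari_top3 top3_digits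
    let irisan_set : PySem.Set String := PySem.Set.ofList irisan_2d
    semua_3d.foldl (fun hasil angka =>
      let dua_d_belakang := PySem.Str.slice angka (some 1) (some 3)
      if PySem.Set.contains irisan_set dua_d_belakang then hasil ++ [angka] else hasil) []

-- ===== PORT B =====
-- hand port of f"{j:02d}": exact for 0 <= j < 100, the only values B formats
def pad2 (j : Int) : List Char :=
  [Nat.digitChar (j.toNat / 10), Nat.digitChar (j.toNat % 10)]

def gen_3d_irisan_final_alt (irisan_2d : List String) (top3_digits : List Int) : List String :=
  if irisan_2d = [] ∨ top3_digits = [] then []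
  else
    let irisan_set : PySem.Set String := PySem.Set.ofList irisan_2d
    let valid_suffixes :=
      ((PySem.List.pyRange 0 100 1).map (fun j => String.ofList (pad2 j))).filter
        (fun s => PySem.Set.contains irisan_set s)
    let top3_set : PySem.Set String := PySem.Set.ofList (top3_digits.map PySem.Int.toStr)
    ("0123456789".toList).foldl (fun hasil d =>
      valid_suffixes.foldl (fun h s =>
        let angka := String.ofList (d :: s.toList)
        if angka.toList.any (fun c => PySem.Set.contains top3_set (String.ofList [c]))
        then h ++ [angka] else h) hasil) []

-- ===== PRECONDITION & SPEC =====
def Spec_gen_3d_irisan_final (irisan_2d : List String) (top3_digits : List Int) (out : List String) : Prop := out = gen_3d_irisan_final_alt irisan_2d top3_digits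
instance (irisan_2d : List String) (top3_digits : List Int) (out : List String) : Decidable (Spec_gen_3d_irisan_final irisan_2d top3_digits out) := by unfold Spec_gen_3d_irisan_final; infer_instance

-- ===== CLAIM (what is proved, stated in full; the proofs are below) =====
def Claim_equal_gen_3d_irisan_final : Prop := ∀ (irisan_2d : List String) (top3_digits : List Int), Dom_gen_3d_irisan_final irisan_2d top3_digits → Spec_gen_3d_irisan_final irisan_2d top3_digits (gen_3d_irisan_final irisan_2d top3_digits)

-- ===== LEMMAS AND PROOFS =====

set_option maxRecDepth 100000 in
lemma pv_pyRange1000_split :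
    PySem.List.pyRange 0 1000 1
      = (List.range 10).flatMap (fun d => (List.range 100).map (fun j => ((100*d + j : Nat) : Int))) := by
  decide

set_option maxRecDepth 100000 in
lemma pv_pyRange100_split :
    PySem.List.pyRange 0 100 1 = (List.range 100).map (fun j => ((j : Nat) : Int)) := by
  decide

lemma pv_digits : "0123456789".toList = (List.range 10).map Nat.digitChar := by decide

lemma pv_slice3 (a b c : Char) :
    PySem.Str.slice (String.ofList [a,b,c]) (some 1) (some 3) = String.ofList [b,c] := by
  simp [PySem.Str.slice, PySem.List.slice, PySem.List.clampIdx]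

lemma pv_pad3_split (d j : Nat) (hj : j < 100) :
    pad3 ((100*d + j : Nat) : Int) = Nat.digitChar d :: pad2 ((j : Nat) : Int) := by
  simp only [pad3, pad2, Int.toNat_natCast]
  have h1 : (100*d+j)/100 = d := by omega
  have h2 : (100*d+j)/10 % 10 = j/10 := by omega
  have h3 : (100*d+j)%10 = j%10 := by omega
  rw [h1, h2, h3]

lemma pv_map_filter_congr {α β : Type} (l : List α) (p q : α → Bool) (f g : α → β)
    (h : ∀ a ∈ l, p a = q a) (h2 : ∀ a ∈ l, f a = g a) :
    (l.filter p).map f = (l.filter q).map g := by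
  rw [List.filter_congr h]
  exact List.map_congr_left (fun a ha => h2 a (List.mem_of_mem_filter ha))

-- ===== VERDICT (by name: the statement is the Claim_ definition above) =====
theorem gen_3d_irisan_final_spec : Claim_equal_gen_3d_irisan_final := by
  intro irisan top3 _
  unfold Spec_gen_3d_irisan_final
  by_cases hg : irisan = [] ∨ top3 = []
  · simp [gen_3d_irisan_final, gen_3d_irisan_final_alt, hg]
  · have htop : ¬ top3 = [] := fun h => hg (Or.inr h)
    unfold gen_3d_irisan_final gen_3d_irisan_final_alt gen_semua_3d_dari_top3
    rw [if_neg hg, if_neg hg, if_neg htop]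
    simp only [PySem.List.foldl_append_if_eq_filter, PySem.List.foldl_append_if,
      PySem.List.foldl_append_eq_flatMap, List.nil_append, String.toList_ofList]
    rw [pv_pyRange1000_split, List.filter_flatMap, List.map_flatMap, List.filter_flatMap,
      pv_digits, List.flatMap_map]
    simp only [pv_pyRange100_split, List.map_map, List.filter_map, List.filter_filter,
      Function.comp_def, String.toList_ofList]
    congr 1
    funext d
    refine pv_map_filter_congr _ _ _ _ _ ?_ ?_
    · intro j hj
      rw [pv_pad3_split d j (List.mem_range.mp hj)]
      simp only [pad2]
      rw [pv_slice3, Bool.and_comm]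
    · intro j hj
      rw [pv_pad3_split d j (List.mem_range.mp hj)]
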